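-- pv_equiv track=rewrite | github.com/sanit0x79/UniProjects | pythonProjects/periodicSystem2.py | is_periodical
-- ===== SOURCE A (Python) =====
-- def is_periodical(s, E):
--    if s in E:
--       return True
--    if len(s) < 2:
--       return False
--    else:
--       prefix = s[:2]
--       if prefix in E:
--          return is_periodical(s[2:], E)
--       else:
--          return False
-- ===== SOURCE B (Python) =====
-- def is_periodical(s, E):
--     i = 0
--     while True:
--         if s[i:] in E:
--             return True
--         if len(s) - i < 2:
--             return False
--         if s[i:i+2] in E:
--             i += 2
--         else:
--             return False
-- ===== Notes on version B (the rewrite author's own statement) =====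
-- stated objective: alternative
-- what changed: Replaces the self-call on a freshly sliced suffix with an iterative loop that only advances an integer index into the original string, so no intermediate suffix strings are built per step (only the membership-test slices).
import Mathlib
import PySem

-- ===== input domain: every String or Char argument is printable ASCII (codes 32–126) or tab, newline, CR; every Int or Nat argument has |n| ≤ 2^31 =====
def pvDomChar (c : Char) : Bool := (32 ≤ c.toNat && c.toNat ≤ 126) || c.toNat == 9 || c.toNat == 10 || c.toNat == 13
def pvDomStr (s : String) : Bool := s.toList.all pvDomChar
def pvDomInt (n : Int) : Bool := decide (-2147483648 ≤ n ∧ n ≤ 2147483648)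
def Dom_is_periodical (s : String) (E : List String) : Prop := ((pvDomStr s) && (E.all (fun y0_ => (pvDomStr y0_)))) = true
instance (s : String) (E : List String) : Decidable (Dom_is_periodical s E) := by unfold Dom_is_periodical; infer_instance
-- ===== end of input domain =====

-- B replaces A's recursion on a freshly sliced suffix by a loop that advances an integer index into the original string (alternative decomposition; return value only, no side effects involved).

-- ===== PORT A =====
def is_periodical (s : String) (E : List String) : Bool :=
  if E.contains s then true
  else if PySem.Str.len s < 2 then false
  else
    let pfx := PySem.Str.slice s none (some 2)
    if E.contains pfx then is_periodical (PySem.Str.slice s (some 2) none) E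
    else false
termination_by s.toList.length
decreasing_by
  rename_i h1 h2 _
  have hlen : PySem.Str.len s = (s.toList.length : Int) := by
    simp [PySem.Str.len_eq]
  rw [PySem.Str.toList_slice, PySem.Chars.slice_eq_listSlice, PySem.List.slice_from]
  simp only [List.length_drop]
  omega
  norm_num

-- ===== PORT B =====
-- Source B's loop: the state is the index i (a Python int that stays ≥ 0, so ported as Nat);
-- s[i:] and s[i:i+2] for 0 ≤ i are exactly drop/take on the character list.
def pvLoopB (l : List Char) (E : List String) (i : Nat) : Bool :=
  if E.contains (String.ofList (l.drop i)) then true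
  else if l.length - i < 2 then false
  else if E.contains (String.ofList ((l.drop i).take 2)) then pvLoopB l E (i + 2)
  else false
termination_by l.length - i

def is_periodical_alt (s : String) (E : List String) : Bool :=
  pvLoopB s.toList E 0

-- ===== PRECONDITION & SPEC =====
def Spec_is_periodical (s : String) (E : List String) (out : Bool) : Prop := out = is_periodical_alt s E
instance (s : String) (E : List String) (out : Bool) : Decidable (Spec_is_periodical s E out) := by unfold Spec_is_periodical; infer_instance

-- ===== CLAIM (what is proved, stated in full; the proofs are below) =====
def Claim_equal_is_periodical : Prop := ∀ (s : String) (E : List String), Dom_is_periodical s E → Spec_is_periodical s E (is_periodical s E)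

-- ===== LEMMAS AND PROOFS =====
lemma pvLen_ofList (m : List Char) : PySem.Str.len (String.ofList m) = (m.length : Int) := by
  simp [PySem.Str.len_eq]

lemma pvSlice_to_two (m : List Char) :
    PySem.Str.slice (String.ofList m) none (some 2) = String.ofList (m.take 2) := by
  apply String.toList_injective
  simp [PySem.Str.toList_slice, PySem.Chars.slice_eq_listSlice, PySem.List.slice_to]

lemma pvSlice_from_two (m : List Char) :
    PySem.Str.slice (String.ofList m) (some 2) none = String.ofList (m.drop 2) := by
  apply String.toList_injective
  simp [PySem.Str.toList_slice, PySem.Chars.slice_eq_listSlice, PySem.List.slice_from]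

lemma pvLoopB_eq (E : List String) :
    ∀ (n : Nat) (l : List Char) (i : Nat), l.length - i ≤ n →
      pvLoopB l E i = is_periodical (String.ofList (l.drop i)) E := by
  intro n
  induction n with
  | zero =>
      intro l i h
      rw [pvLoopB, is_periodical]
      have hd : (l.drop i).length = 0 := by simp; omega
      simp [hd]
      omega
  | succ n ih =>
      intro l i h
      rw [pvLoopB, is_periodical]
      simp only [pvLen_ofList, pvSlice_to_two, pvSlice_from_two,
        List.drop_drop]
      have hlen : (l.drop i).length = l.length - i := by simp
      rw [hlen]
      have hc : (((l.length - i : Nat) : Int) < 2) ↔ (l.length - i < 2) := by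
        exact_mod_cast Iff.rfl
      simp only [hc]
      by_cases h2 : l.length - i < 2
      · simp [h2]
      · rw [ih l (i + 2) (by omega)]

-- ===== VERDICT (by name: the statement is the Claim_ definition above) =====
theorem is_periodical_spec : Claim_equal_is_periodical := by
  intro s E _
  unfold Spec_is_periodical is_periodical_alt
  have := pvLoopB_eq E s.toList.length s.toList 0 (by omega)
  simp at this
  rw [this]
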